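-- pv_equiv track=rewrite | github.com/valeevasnezhana/pythonstudy | 03.1.FunctionsStringsIO/count_util/count_util.py | count_util
-- ===== SOURCE A (Python) =====
-- import typing as tp
--
-- def count_util(text: str, flags: tp.Optional[str] = None) -> dict[str, int]:
--     """
--     :param text: text to count entities
--     :param flags: flags in command-like format - can be:
--         * -m stands for counting characters
--         * -l stands for counting lines
--         * -L stands for getting length of the longest line
--         * -w stands for counting words
--     More than one flag can be passed at the same time, for example:
--         * "-l -m"
--         * "-lLw"
--     Ommiting flags or passing empty string is equivalent to "-mlLw"
--     :return: mapping from string keys to corresponding counter, where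
--     keys are selected according to the received flags:
--         * "chars" - amount of characters
--         * "lines" - amount of lines
--         * "longest_line" - the longest line length
--         * "words" - amount of words
--     """
--     result = {}
--     default = (flags is None) or (flags == '')
--     if default or ('m' in flags):
--         result['chars'] = len(text)
--
--     if default or ('l' in flags):
--         lines = 0
--         if text:
--             lines = text.count('\n')
--             if text[len(text) - 1] != '\n':
--                 lines += 1
--         result['lines'] = lines
--
--     if default or ('L' in flags):
--         longest_line = 0
--         line_len = 0
--         for symbol in text:
--             if symbol != '\n':
--                 line_len += 1
--             else:
--                 line_len = 0
--             longest_line = max(longest_line, line_len)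
--         result['longest_line'] = longest_line
--
--     if default or ('w' in flags):
--         result['words'] = len(text.split())
--
--     return result
-- ===== SOURCE B (Python) =====
-- import typing as tp
--
--
-- def count_util(text: str, flags: tp.Optional[str] = None) -> dict[str, int]:
--     default = not flags
--
--     def active(f: str) -> bool:
--         return default or f in flags
--
--     parts = text.split('\n')
--     result = {}
--     if active('m'):
--         result['chars'] = len(text)
--     if active('l'):
--         result['lines'] = 0 if not text else (len(parts) - 1 if text.endswith('\n') else len(parts))
--     if active('L'):
--         result['longest_line'] = max(len(p) for p in parts)
--     if active('w'):
--         result['words'] = len(text.split())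
--     return result
-- ===== Notes on version B (the rewrite author's own statement) =====
-- stated objective: simpler
-- what changed: B splits the text on the newline character once and derives both the line count (from the number of parts plus a trailing-newline check) and the longest-line length (as the maximum of the part lengths) from that single split, replacing A's per-character running-max scan and its substring-count-plus-last-char arithmetic.
import Mathlib
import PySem

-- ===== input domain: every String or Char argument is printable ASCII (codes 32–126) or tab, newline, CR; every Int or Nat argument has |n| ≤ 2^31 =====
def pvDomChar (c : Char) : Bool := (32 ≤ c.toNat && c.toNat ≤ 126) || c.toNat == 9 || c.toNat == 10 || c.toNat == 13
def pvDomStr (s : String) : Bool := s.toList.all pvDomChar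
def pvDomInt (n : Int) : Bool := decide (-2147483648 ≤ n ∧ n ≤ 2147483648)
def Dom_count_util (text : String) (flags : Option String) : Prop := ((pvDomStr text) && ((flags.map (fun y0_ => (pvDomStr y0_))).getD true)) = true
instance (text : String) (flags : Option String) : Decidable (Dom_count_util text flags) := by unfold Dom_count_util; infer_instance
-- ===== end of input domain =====

-- ===== PORT A =====
-- B derives 'lines' and 'longest_line' from one split of the text on '\n' instead of A's
-- per-character scan; objective: simpler.
def count_util (text : String) (flags : Option String) : List (String × Int) :=
  let dflt : Bool := match flags with | none => true | some f => f == ""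
  let r : PySem.Dict String Int := PySem.Dict.empty
  let r := if dflt || (match flags with | none => false | some f => PySem.Str.isIn "m" f) then
      r.insert "chars" (PySem.Str.len text)
    else r
  let r := if dflt || (match flags with | none => false | some f => PySem.Str.isIn "l" f) then
      let lines : Int := 0
      let lines : Int := if text.toList ≠ [] then
          let lines : Int := (PySem.Str.count text "\n" : Int)
          if PySem.Str.pyGet? text (PySem.Str.len text - 1) ≠ some '\n' then lines + 1 else lines
        else lines
      r.insert "lines" lines
    else r
  let r := if dflt || (match flags with | none => false | some f => PySem.Str.isIn "L" f) then
      let st := text.toList.foldl (fun (st : Int × Int) symbol =>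
        let line_len : Int := if symbol ≠ '\n' then st.2 + 1 else 0
        (max st.1 line_len, line_len)) (0, 0)
      r.insert "longest_line" st.1
    else r
  let r := if dflt || (match flags with | none => false | some f => PySem.Str.isIn "w" f) then
      r.insert "words" ((PySem.Str.split₀ text).length : Int)
    else r
  r.items

-- ===== PORT B =====
-- B-side helper: the 'active' closure of Source B
def pvB_active (dflt : Bool) (flags : Option String) (f : String) : Bool :=
  dflt || (match flags with | none => false | some fl => PySem.Str.isIn f fl)

def count_util_alt (text : String) (flags : Option String) : List (String × Int) :=
  let dflt : Bool := match flags with | none => true | some f => f == ""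
  let parts : List (List Char) := PySem.Chars.splitOn text.toList ['\n']
  let r : PySem.Dict String Int := PySem.Dict.empty
  let r := if pvB_active dflt flags "m" then r.insert "chars" (PySem.Str.len text) else r
  let r := if pvB_active dflt flags "l" then
      r.insert "lines" (if text.toList = [] then 0 else
        if PySem.Str.endswith text "\n" then (parts.length : Int) - 1 else (parts.length : Int))
    else r
  let r := if pvB_active dflt flags "L" then
      r.insert "longest_line" (PySem.List.maxD (parts.map (fun p => (p.length : Int))) (fun n => n) 0)
    else r
  let r := if pvB_active dflt flags "w" then r.insert "words" ((PySem.Str.split₀ text).length : Int) else r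
  r.items

-- ===== PRECONDITION & SPEC =====
def Spec_count_util (text : String) (flags : Option String) (out : List (String × Int)) : Prop := out = count_util_alt text flags
instance (text : String) (flags : Option String) (out : List (String × Int)) : Decidable (Spec_count_util text flags out) := by unfold Spec_count_util; infer_instance

-- ===== CLAIM (what is proved, stated in full; the proofs are below) =====
def Claim_equal_count_util : Prop := ∀ (text : String) (flags : Option String), Dom_count_util text flags → Spec_count_util text flags (count_util text flags)

-- ===== LEMMAS AND PROOFS =====

def pvSplitNL : List Char → List (List Char)
  | [] => [[]]
  | c :: cs => if c = '\n' then [] :: pvSplitNL cs else (pvSplitNL cs).modifyHead (c :: ·)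

theorem pvSplitNL_ne_nil (l : List Char) : pvSplitNL l ≠ [] := by
  induction l with
  | nil => simp [pvSplitNL]
  | cons c cs ih =>
    simp only [pvSplitNL]
    split
    · simp
    · cases h : pvSplitNL cs with
      | nil => exact absurd h ih
      | cons p t => simp [List.modifyHead]

theorem pvSplitOn_go_eq (fuel : Nat) : ∀ (l cur : List Char) (acc : List (List Char)),
    l.length < fuel →
    PySem.Chars.splitOn.go ['\n'] fuel l cur acc
      = acc.reverse ++ (pvSplitNL l).modifyHead (cur.reverse ++ ·) := by
  induction fuel with
  | zero => intro l cur acc h; omega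
  | succ f ih =>
    intro l cur acc h
    cases l with
    | nil => simp [PySem.Chars.splitOn.go, pvSplitNL]
    | cons c cs =>
      by_cases hc : c = '\n'
      · subst hc
        rw [PySem.Chars.splitOn.go]
        simp only [List.isPrefixOf, List.length_cons] at *
        rw [if_pos (by simp)]
        simp only [List.length_nil, Nat.zero_add, List.drop_one, List.tail_cons]
        rw [ih cs [] _ (by simp at h; omega)]
        simp only [pvSplitNL, if_pos rfl, List.modifyHead_cons, List.reverse_nil,
          List.nil_append, List.reverse_cons, List.append_assoc, List.singleton_append]
        cases pvSplitNL cs <;> simp [List.modifyHead]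
      · rw [PySem.Chars.splitOn.go]
        rw [if_neg (by simp [List.isPrefixOf]; intro h'; exact absurd h'.symm hc)]
        rw [ih cs (c :: cur) acc (by simp at h; omega)]
        simp only [pvSplitNL, if_neg hc]
        cases hs : pvSplitNL cs with
        | nil => simp [List.modifyHead]
        | cons p t => simp [List.modifyHead]

theorem pvSplitOn_eq (l : List Char) : PySem.Chars.splitOn l ['\n'] = pvSplitNL l := by
  rw [PySem.Chars.splitOn, pvSplitOn_go_eq (l.length + 1) l [] [] (by omega)]
  cases h : pvSplitNL l <;> simp [List.modifyHead]

theorem pvCount_go_eq (fuel : Nat) : ∀ (l : List Char) (acc : Nat), l.length ≤ fuel →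
    PySem.Chars.count.go ['\n'] fuel l acc = acc + l.count '\n' := by
  induction fuel with
  | zero =>
    intro l acc h
    cases l with
    | nil => simp [PySem.Chars.count.go]
    | cons c cs => simp at h
  | succ f ih =>
    intro l acc h
    cases l with
    | nil => simp [PySem.Chars.count.go]
    | cons c cs =>
      by_cases hc : c = '\n'
      · subst hc
        rw [PySem.Chars.count.go, if_pos (by simp)]
        simp only [List.length_singleton, List.drop_one, List.tail_cons]
        rw [ih cs (acc + 1) (by simp at h; omega)]
        simp [List.count_cons]
        omega
      · rw [PySem.Chars.count.go, if_neg (by simp [List.isPrefixOf]; intro h'; exact absurd h'.symm hc)]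
        rw [ih cs acc (by simp at h; omega)]
        simp [List.count_cons, hc]

theorem pvCount_eq (l : List Char) : PySem.Chars.count l ['\n'] = l.count '\n' := by
  rw [PySem.Chars.count, if_neg (by simp)]
  exact (pvCount_go_eq l.length l 0 (le_refl _)).trans (by omega)

theorem pvLength_splitNL (l : List Char) : (pvSplitNL l).length = l.count '\n' + 1 := by
  induction l with
  | nil => simp [pvSplitNL]
  | cons c cs ih =>
    simp only [pvSplitNL]
    by_cases hc : c = '\n'
    · simp [hc, List.count_cons, ih]
    · simp [hc, List.count_cons, List.length_modifyHead, ih]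

theorem pvEndswith_iff (l : List Char) :
    PySem.Chars.endswith l ['\n'] = true ↔ l.getLast? = some '\n' := by
  rw [PySem.Chars.endswith, List.isSuffixOf_iff_suffix]
  constructor
  · rintro ⟨pre, rfl⟩
    simp
  · intro h
    cases hl : l.reverse with
    | nil => simp [hl] at h; simp [h] at hl; simp [hl] at h
    | cons x xs =>
      have : l = xs.reverse ++ [x] := by
        have := congrArg List.reverse hl; simpa using this
      rw [this] at h ⊢
      simp [List.getLast?_append] at h
      exact ⟨xs.reverse, by rw [h]⟩

def pvMaxLines (l : Int) : List Char → Int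
  | [] => l
  | c :: cs => if c = '\n' then max l (pvMaxLines 0 cs) else pvMaxLines (l + 1) cs

theorem pvLe_maxLines (cs : List Char) : ∀ (l : Int), l ≤ pvMaxLines l cs := by
  induction cs with
  | nil => intro l; simp [pvMaxLines]
  | cons c cs ih =>
    intro l
    simp only [pvMaxLines]
    by_cases hc : c = '\n'
    · simp [hc, le_max_left]
    · simp only [if_neg hc]
      exact le_trans (by omega) (ih (l + 1))

theorem pvFold_eq (cs : List Char) : ∀ (L l : Int), l ≤ L →
    (cs.foldl (fun (st : Int × Int) symbol =>
        let line_len : Int := if symbol ≠ '\n' then st.2 + 1 else 0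
        (max st.1 line_len, line_len)) (L, l)).1 = max L (pvMaxLines l cs) := by
  induction cs with
  | nil => intro L l h; simp [pvMaxLines]; omega
  | cons c cs ih =>
    intro L l h
    simp only [List.foldl_cons, pvMaxLines]
    by_cases hc : c = '\n'
    · subst hc
      simp only [ne_eq, not_true_eq_false, if_false, reduceIte]
      rw [ih (max L 0) 0 (le_max_right _ _)]
      have h0 : (0:Int) ≤ pvMaxLines 0 cs := pvLe_maxLines cs 0
      simp only [max_def]
      split_ifs <;> omega
    · rw [if_pos hc, if_neg hc]
      rw [ih (max L (l+1)) (l+1) (le_max_right _ _)]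
      have h1 : l + 1 ≤ pvMaxLines (l+1) cs := pvLe_maxLines cs (l+1)
      simp only [max_def]
      split_ifs <;> omega

theorem pvFoldlMaxInit (a b : Int) (xs : List Int) :
    List.foldl max (max a b) xs = max a (List.foldl max b xs) := by
  induction xs generalizing b with
  | nil => simp
  | cons x xs ih => simp only [List.foldl_cons, max_assoc, ih]

theorem pvMaxLines_splitNL (cs : List Char) : ∀ (l : Int) (p : List Char) (t : List (List Char)),
    pvSplitNL cs = p :: t →
    pvMaxLines l cs = List.foldl max (l + (p.length : Int)) (t.map (fun q => (q.length : Int))) := by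
  induction cs with
  | nil => intro l p t h
           simp [pvSplitNL] at h
           obtain ⟨rfl, rfl⟩ := h
           simp [pvMaxLines]
  | cons c cs ih =>
    intro l p t h
    by_cases hc : c = '\n'
    · simp only [pvSplitNL, if_pos hc] at h
      obtain ⟨rfl, rfl⟩ := List.cons.inj h
      obtain ⟨q, r, hqr⟩ : ∃ q r, pvSplitNL cs = q :: r := by
        cases hs : pvSplitNL cs with
        | nil => exact absurd hs (pvSplitNL_ne_nil cs)
        | cons q r => exact ⟨q, r, rfl⟩
      simp only [pvMaxLines, if_pos hc, ih 0 q r hqr]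
      simp only [hqr, List.map_cons, List.foldl_cons, List.length_nil, Nat.cast_zero,
        add_zero, zero_add]
      rw [pvFoldlMaxInit]
    · simp only [pvSplitNL, if_neg hc] at h
      obtain ⟨q, r, hqr⟩ : ∃ q r, pvSplitNL cs = q :: r := by
        cases hs : pvSplitNL cs with
        | nil => exact absurd hs (pvSplitNL_ne_nil cs)
        | cons q r => exact ⟨q, r, rfl⟩
      rw [hqr] at h
      simp only [List.modifyHead_cons] at h
      obtain ⟨rfl, rfl⟩ := List.cons.inj h
      simp only [pvMaxLines, if_neg hc, ih (l+1) q r hqr]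
      congr 1
      simp
      ring

theorem pvLines_eq (text : String) :
    (if text.toList ≠ [] then
        if PySem.Str.pyGet? text (PySem.Str.len text - 1) ≠ some '\n' then
          ((PySem.Str.count text "\n" : Int) + 1) else (PySem.Str.count text "\n" : Int)
      else (0 : Int))
    = (if text.toList = [] then 0 else
        if PySem.Str.endswith text "\n" then ((PySem.Chars.splitOn text.toList ['\n']).length : Int) - 1
        else ((PySem.Chars.splitOn text.toList ['\n']).length : Int)) := by
  by_cases hl : text.toList = []
  · simp [hl]
  · rw [if_pos hl, if_neg hl]
    have hb : ("\n" : String).toList = ['\n'] := rfl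
    have hcount : (PySem.Str.count text "\n") = text.toList.count '\n' := by
      simp only [PySem.Str.count, hb]
      exact pvCount_eq text.toList
    have hlen : (PySem.Chars.splitOn text.toList ['\n']).length = text.toList.count '\n' + 1 := by
      rw [pvSplitOn_eq]
      exact pvLength_splitNL text.toList
    have hget : PySem.Str.pyGet? text (PySem.Str.len text - 1) = text.toList.getLast? := by
      have h1 : PySem.Str.len text - 1 = ((text.toList.length - 1 : Nat) : Int) := by
        simp only [PySem.Str.len]
        have : text.toList.length ≠ 0 := fun h => hl (List.length_eq_zero_iff.mp h)
        omega
      rw [h1]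
      simp only [PySem.Str.pyGet?, PySem.Chars.pyGet?, PySem.List.pyGet?_natCast]
      exact List.getLast?_eq_getElem?.symm
    have hendsw : PySem.Str.endswith text "\n" = true ↔ text.toList.getLast? = some '\n' := by
      simp only [PySem.Str.endswith, hb]
      exact pvEndswith_iff text.toList
    by_cases hend : text.toList.getLast? = some '\n'
    · rw [if_neg (show ¬ _ from by rw [hget]; simp [hend]), if_pos (hendsw.mpr hend)]
      rw [hcount, hlen]
      push_cast
      ring
    · rw [if_pos (show _ ≠ _ from by rw [hget]; exact hend), if_neg (fun h => hend (hendsw.mp h))]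
      rw [hcount, hlen]
      push_cast
      ring

theorem pvLongest_eq (text : String) :
    (text.toList.foldl (fun (st : Int × Int) symbol =>
        let line_len : Int := if symbol ≠ '\n' then st.2 + 1 else 0
        (max st.1 line_len, line_len)) (0, 0)).1
    = PySem.List.maxD ((PySem.Chars.splitOn text.toList ['\n']).map (fun p => (p.length : Int)))
        (fun n => n) 0 := by
  obtain ⟨p, t, hpt⟩ : ∃ p t, pvSplitNL text.toList = p :: t := by
    cases hs : pvSplitNL text.toList with
    | nil => exact absurd hs (pvSplitNL_ne_nil _)
    | cons p t => exact ⟨p, t, rfl⟩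
  rw [pvFold_eq text.toList 0 0 (le_refl _), pvSplitOn_eq, hpt,
    pvMaxLines_splitNL text.toList 0 p t hpt]
  simp only [List.map_cons, PySem.List.maxD_id_cons, zero_add]
  have h0 : (0:Int) ≤ List.foldl max (p.length : Int) (t.map (fun q => (q.length : Int))) :=
    le_trans (by positivity) (PySem.List.le_foldl_max _ _).1
  exact max_eq_right h0

-- ===== VERDICT (by name: the statement is the Claim_ definition above) =====
theorem count_util_spec : Claim_equal_count_util := by
  intro text flags _
  unfold Spec_count_util count_util count_util_alt
  simp only [pvB_active]
  rw [pvLongest_eq, pvLines_eq]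
  rfl
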